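-- pv_equiv track=rewrite | github.com/ganeshskudva/Leetcode-Python | Easy/L2373.py | largestLocal
-- ===== SOURCE A (Python) =====
-- from typing import List
--
-- def largestLocal(grid: List[List[int]]) -> List[List[int]]:
--     n = len(grid)
--     res = [[0 for j in range(n - 2)] for i in range(n - 2)]
--
--     for i in range(1, n - 1):
--         for j in range(1, n - 1):
--             tmp = 0
--
--             for k in range(i - 1, i + 2):
--                 for l in range(j - 1, j + 2):
--                     tmp = max(tmp, grid[k][l])
--
--             res[i - 1][j - 1] = tmp
--
--     return res
-- ===== SOURCE B (Python) =====
-- from typing import List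
--
-- def largestLocal(grid: List[List[int]]) -> List[List[int]]:
--     n = len(grid)
--     m = n - 2
--     # stage 1: horizontal 3-window maxima per row
--     H = [[max(row[j], row[j + 1], row[j + 2]) for j in range(m)] for row in grid]
--     # stage 2: vertical 3-window maxima over H, floored at 0 like A
--     return [[max(0, H[i][j], H[i + 1][j], H[i + 2][j]) for j in range(m)] for i in range(m)]
-- ===== Notes on version B (the rewrite author's own statement) =====
-- stated objective: faster
-- what changed: Replaces the per-cell rescan of each 3x3 block (9 reads per output cell) by a separable two-stage computation: one pass of horizontal 3-window row maxima into a table H, then a vertical 3-window max pass over H (floored at 0 as A's tmp=0 initialization does), cutting the work per cell by a constant factor.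
import Mathlib
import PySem

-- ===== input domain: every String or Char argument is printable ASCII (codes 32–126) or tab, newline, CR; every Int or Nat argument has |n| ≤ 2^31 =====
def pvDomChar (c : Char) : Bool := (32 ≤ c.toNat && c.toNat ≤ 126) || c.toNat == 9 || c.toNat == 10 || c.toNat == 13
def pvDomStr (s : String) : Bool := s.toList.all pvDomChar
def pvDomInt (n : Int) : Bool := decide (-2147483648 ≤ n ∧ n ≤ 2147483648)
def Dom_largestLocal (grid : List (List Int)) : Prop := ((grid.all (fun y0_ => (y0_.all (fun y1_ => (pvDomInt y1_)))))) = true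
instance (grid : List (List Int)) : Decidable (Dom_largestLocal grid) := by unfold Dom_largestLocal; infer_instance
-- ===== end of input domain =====

-- B computes the same windowed maxima by a separable two-stage pass (horizontal 3-window row maxima into a
-- table H, then vertical 3-window maxima over H, floored at 0 like A's tmp = 0) instead of rescanning each
-- 3x3 block per cell; same asymptotic cost.

-- ===== PORT A =====
-- grid[k][l] (both indices nonnegative here); out-of-range = IndexError, excluded by Pre_
def largestLocal (grid : List (List Int)) : List (List Int) :=
  (PySem.List.pyRange 1 ((grid.length : Int) - 1) 1).map (fun i =>
    (PySem.List.pyRange 1 ((grid.length : Int) - 1) 1).map (fun j =>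
      (PySem.List.pyRange (i - 1) (i + 2) 1).foldl (fun tmp k =>
        (PySem.List.pyRange (j - 1) (j + 2) 1).foldl (fun tmp l =>
          max tmp (PySem.List.pyGetD (PySem.List.pyGetD grid k []) l 0)) tmp) 0))

-- ===== PORT B =====
-- stage 1 of Source B: horizontal 3-window maxima of one row (m = n - 2)
def pvRowMax3 (m : Nat) (row : List Int) : List Int :=
  (List.range m).map (fun (j : Nat) =>
    max (max (PySem.List.pyGetD row (j : Int) 0) (PySem.List.pyGetD row ((j : Int) + 1) 0))
        (PySem.List.pyGetD row ((j : Int) + 2) 0))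

def largestLocal_alt (grid : List (List Int)) : List (List Int) :=
  (List.range (grid.length - 2)).map (fun (i : Nat) =>
    (List.range (grid.length - 2)).map (fun (j : Nat) =>
      max (max (max (0 : Int)
        (PySem.List.pyGetD (PySem.List.pyGetD (grid.map (pvRowMax3 (grid.length - 2))) (i : Int) []) (j : Int) 0))
        (PySem.List.pyGetD (PySem.List.pyGetD (grid.map (pvRowMax3 (grid.length - 2))) ((i : Int) + 1) []) (j : Int) 0))
        (PySem.List.pyGetD (PySem.List.pyGetD (grid.map (pvRowMax3 (grid.length - 2))) ((i : Int) + 2) []) (j : Int) 0)))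

-- ===== PRECONDITION & SPEC =====
-- Pre_ excludes exactly the ragged grids on which A raises IndexError: when n = len(grid) ≥ 3,
-- A reads grid[k][l] for all 0 ≤ k,l < n, so every row must have length ≥ n.
def Pre_largestLocal (grid : List (List Int)) : Prop :=
  grid.length < 3 ∨ ∀ r ∈ grid, grid.length ≤ r.length
instance (grid : List (List Int)) : Decidable (Pre_largestLocal grid) := by
  unfold Pre_largestLocal; infer_instance
def pvWitness_largestLocal : List (List Int) := [[1, 2, 3], [4, 5, 6], [7, 8, 9]]
def Spec_largestLocal (grid : List (List Int)) (out : List (List Int)) : Prop := out = largestLocal_alt grid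
instance (grid : List (List Int)) (out : List (List Int)) : Decidable (Spec_largestLocal grid out) := by unfold Spec_largestLocal; infer_instance

-- ===== CLAIM (what is proved, stated in full; the proofs are below) =====
def Claim_equal_largestLocal : Prop := ∀ (grid : List (List Int)), Dom_largestLocal grid → Pre_largestLocal grid → Spec_largestLocal grid (largestLocal grid)

-- ===== LEMMAS AND PROOFS =====

lemma pyRange3 (a : Int) : PySem.List.pyRange a (a + 3) 1 = [a, a + 1, a + 2] := by
  rw [PySem.List.pyRange_one_cons (by omega), PySem.List.pyRange_one_cons (by omega),
      PySem.List.pyRange_one_cons (by omega), PySem.List.pyRange_one_eq_nil (by omega)]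
  have h : a + 1 + 1 = a + 2 := by ring
  rw [h]

lemma pvMapGetD (f : List Int → List Int) (grid : List (List Int)) (k : Nat)
    (hk : k < grid.length) :
    PySem.List.pyGetD (grid.map f) ((k : Int)) [] = f (grid.getD k []) := by
  simp [PySem.List.pyGetD_natCast, List.getD_eq_getElem?_getD, List.getElem?_map,
    List.getElem?_eq_getElem hk]

lemma pvRowMax3_get (m : Nat) (row : List Int) (b : Nat) (hb : b < m) :
    PySem.List.pyGetD (pvRowMax3 m row) ((b : Int)) 0
      = max (max (PySem.List.pyGetD row (b : Int) 0) (PySem.List.pyGetD row ((b : Int) + 1) 0))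
            (PySem.List.pyGetD row ((b : Int) + 2) 0) := by
  unfold pvRowMax3
  simp [PySem.List.pyGetD_natCast, List.getD_eq_getElem?_getD, List.getElem?_map,
    List.getElem?_range, hb]

lemma pvMaxChain (x00 x01 x02 x10 x11 x12 x20 x21 x22 : Int) :
    max (max (max (max (max (max (max (max (max (0 : Int) x00) x01) x02) x10) x11) x12) x20) x21) x22
      = max (max (max 0 (max (max x00 x01) x02)) (max (max x10 x11) x12)) (max (max x20 x21) x22) := by
  simp [max_assoc]

-- ===== VERDICT (by name: the statement is the Claim_ definition above) =====
theorem largestLocal_spec : Claim_equal_largestLocal := by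
  intro grid _ hpre
  unfold Spec_largestLocal largestLocal largestLocal_alt
  by_cases h3 : grid.length < 3
  · have h1 : ((grid.length : Int) - 1) ≤ 1 := by omega
    have hm : grid.length - 2 = 0 := by omega
    rw [PySem.List.pyRange_one_eq_nil h1]
    simp [hm]
  · have hR : PySem.List.pyRange 1 ((grid.length : Int) - 1) 1
        = (List.range (grid.length - 2)).map (fun (k : Nat) => 1 + (k : Int)) := by
      apply List.ext_getElem
      · simp [PySem.List.length_pyRange_one]
        omega
      · intro k hk1 hk2
        simp [PySem.List.getElem_pyRange_one, List.getElem_range]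
    rw [hR, List.map_map]
    apply List.map_congr_left
    intro a ha
    simp only [List.mem_range] at ha
    simp only [Function.comp, List.map_map]
    apply List.map_congr_left
    intro b hb
    simp only [List.mem_range] at hb
    simp only [Function.comp]
    have e1 : (1 + (a : Int) - 1) = (a : Int) := by ring
    have e2 : (1 + (a : Int) + 2) = (a : Int) + 3 := by ring
    have e3 : (1 + (b : Int) - 1) = (b : Int) := by ring
    have e4 : (1 + (b : Int) + 2) = (b : Int) + 3 := by ring
    simp only [e1, e2, e3, e4, pyRange3, List.foldl]
    have c1 : ((a : Int)) + 1 = (((a + 1 : Nat)) : Int) := by push_cast; ring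
    have c2 : ((a : Int)) + 2 = (((a + 2 : Nat)) : Int) := by push_cast; ring
    rw [c1, c2]
    have rowA : ∀ (k : Nat), k < grid.length →
        PySem.List.pyGetD grid ((k : Int)) [] = grid.getD k [] := by
      intro k hk
      simp [PySem.List.pyGetD_natCast]
    rw [rowA a (by omega), rowA (a + 1) (by omega), rowA (a + 2) (by omega),
        pvMapGetD _ _ a (by omega), pvMapGetD _ _ (a + 1) (by omega),
        pvMapGetD _ _ (a + 2) (by omega),
        pvRowMax3_get _ _ b hb, pvRowMax3_get _ _ b hb, pvRowMax3_get _ _ b hb]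
    exact pvMaxChain _ _ _ _ _ _ _ _ _
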